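-- pv_equiv track=rewrite | github.com/JVieir4/Universidade | Código/Python/1.Introdução/cruzamentos.py | cruzamentos
-- ===== SOURCE A (Python) =====
-- def cruzamentos(ruas):
--     cruzamentos = {}
--     for rua in ruas:
--         if rua[0] not in cruzamentos.keys():
--             cruzamentos[rua[0]] = 1
--         else:
--             cruzamentos[rua[0]] += 1
--         if rua[-1] not in cruzamentos.keys():
--             cruzamentos[rua[-1]] = 1
--         elif rua[0] != rua[-1]:
--             cruzamentos[rua[-1]] += 1
--
--     res = list(cruzamentos.items())
--     res.sort(key = lambda x: (x[1], x[0]) )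
--     return res
-- ===== SOURCE B (Python) =====
-- def cruzamentos(ruas):
--     pontos = []
--     for rua in ruas:
--         pontos.append(rua[0])
--         if rua[-1] != rua[0]:
--             pontos.append(rua[-1])
--     pontos.sort()
--     pares = []
--     for p in pontos:
--         if pares and pares[-1][0] == p:
--             pares[-1] = (p, pares[-1][1] + 1)
--         else:
--             pares.append((p, 1))
--     return sorted(pares, key=lambda x: (x[1], x[0]))
-- ===== Notes on version B (the rewrite author's own statement) =====
-- stated objective: alternative
-- what changed: B replaces A's dict-based counting (hash accumulation then sort of items) by building a flat endpoint list, sorting it and counting runs of consecutive equal names, then sorting the (name,count) pairs.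
import Mathlib
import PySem

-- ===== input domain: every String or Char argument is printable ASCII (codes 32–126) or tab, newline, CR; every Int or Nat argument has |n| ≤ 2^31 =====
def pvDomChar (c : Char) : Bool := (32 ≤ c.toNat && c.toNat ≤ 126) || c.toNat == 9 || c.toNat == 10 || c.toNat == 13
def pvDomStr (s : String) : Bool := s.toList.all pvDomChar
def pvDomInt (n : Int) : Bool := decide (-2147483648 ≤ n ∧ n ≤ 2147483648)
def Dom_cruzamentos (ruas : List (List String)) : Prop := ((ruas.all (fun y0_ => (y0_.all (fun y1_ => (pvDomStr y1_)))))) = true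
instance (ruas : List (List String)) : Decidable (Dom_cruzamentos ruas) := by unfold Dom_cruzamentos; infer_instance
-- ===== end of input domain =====

-- B counts street endpoints by sorting the flat endpoint list and counting runs of equal names,
-- instead of A's dict accumulation; same cost class, different data structure (objective: alternative).

-- ===== PORT A =====
-- the body of A's 'for rua in ruas' loop; empty 'rua' (rua[0] raises IndexError) is excluded by Pre_
def cruzAStep (d : PySem.Dict String Int) (rua : List String) : PySem.Dict String Int :=
  match PySem.List.pyGet? rua 0, PySem.List.pyGet? rua (-1) with
  | some h, some l =>
    let d1 := if !(d.contains h) then d.insert h 1 else d.insert h (d.getD h 0 + 1)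
    if !(d1.contains l) then d1.insert l 1
    else if h ≠ l then d1.insert l (d1.getD l 0 + 1)
    else d1
  | _, _ => d

def cruzamentos (ruas : List (List String)) : List (String × Int) :=
  PySem.List.sorted2 ((ruas.foldl cruzAStep PySem.Dict.empty).items) (fun x => x.2) (fun x => x.1)

-- ===== PORT B =====
-- body of B's first loop: pontos.append(rua[0]); if rua[-1] != rua[0]: pontos.append(rua[-1])
def cruzBPoint (pontos : List String) (rua : List String) : List String :=
  match PySem.List.pyGet? rua 0, PySem.List.pyGet? rua (-1) with
  | some h, some l =>
    let p1 := pontos ++ [h]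
    if l ≠ h then p1 ++ [l] else p1
  | _, _ => pontos

-- body of B's second loop: extend the current run or start a new (p, 1) pair
def cruzBGroup (pares : List (String × Int)) (p : String) : List (String × Int) :=
  match pares.getLast? with
  | some q => if q.1 = p then pares.dropLast ++ [(p, q.2 + 1)] else pares ++ [(p, 1)]
  | none => pares ++ [(p, 1)]

def cruzamentos_alt (ruas : List (List String)) : List (String × Int) :=
  let pontos := ruas.foldl cruzBPoint []
  let spontos := PySem.List.sorted pontos (fun x => x)
  let pares := spontos.foldl cruzBGroup []
  PySem.List.sorted2 pares (fun x => x.2) (fun x => x.1)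

-- ===== PRECONDITION & SPEC =====
-- Pre_ excludes exactly the inputs containing an empty street, on which A (and B) raise IndexError at rua[0]
def Pre_cruzamentos (ruas : List (List String)) : Prop := ∀ rua ∈ ruas, rua ≠ []
instance (ruas : List (List String)) : Decidable (Pre_cruzamentos ruas) := by unfold Pre_cruzamentos; infer_instance
def pvWitness_cruzamentos : List (List String) := [["a", "b"], ["b", "c", "b"], ["d"]]

def Spec_cruzamentos (ruas : List (List String)) (out : List (String × Int)) : Prop := out = cruzamentos_alt ruas
instance (ruas : List (List String)) (out : List (String × Int)) : Decidable (Spec_cruzamentos ruas out) := by unfold Spec_cruzamentos; infer_instance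

-- ===== CLAIM (what is proved, stated in full; the proofs are below) =====
def Claim_equal_cruzamentos : Prop := ∀ (ruas : List (List String)), Dom_cruzamentos ruas → Pre_cruzamentos ruas → Spec_cruzamentos ruas (cruzamentos ruas)

-- ===== LEMMAS AND PROOFS =====

-- the multiset of endpoints contributed by one street
def cruzEnds (rua : List String) : List String :=
  match PySem.List.pyGet? rua 0, PySem.List.pyGet? rua (-1) with
  | some h, some l => h :: (if l ≠ h then [l] else [])
  | _, _ => []

-- run-length counting result on a list: distinct names (first occurrences) with their counts
def cruzGm (m : List String) : List (String × Int) :=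
  (PySem.Set.ofList m).map (fun k => (k, (m.count k : Int)))

-- B's first loop collects the flat endpoint list
lemma cruzB_points (ruas : List (List String)) (acc : List String) :
    ruas.foldl cruzBPoint acc = acc ++ ruas.flatMap cruzEnds := by
  have h : cruzBPoint = fun acc rua => acc ++ cruzEnds rua := by
    funext acc rua
    unfold cruzBPoint cruzEnds
    cases PySem.List.pyGet? rua 0 with
    | none => simp
    | some h =>
      cases PySem.List.pyGet? rua (-1) with
      | none => simp
      | some l => by_cases hlh : l ≠ h <;> simp [hlh]
  rw [h, PySem.List.foldl_append_eq_flatMap]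

-- A's loop body counts exactly the endpoints of the street
lemma cruzA_step (d : PySem.Dict String Int) (rua : List String) :
    cruzAStep d rua = (cruzEnds rua).foldl (fun d x => d.insert x (d.getD x 0 + 1)) d := by
  unfold cruzAStep cruzEnds
  cases hh : PySem.List.pyGet? rua 0 with
  | none => rfl
  | some h =>
    cases hl : PySem.List.pyGet? rua (-1) with
    | none => rfl
    | some l =>
      have step1 : (if !(d.contains h) then d.insert h 1 else d.insert h (d.getD h 0 + 1))
          = d.insert h (d.getD h 0 + 1) := by
        by_cases hc : d.contains h = true
        · simp [hc]
        · have : d.contains h = false := by simpa using hc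
          rw [PySem.Dict.getD_of_not_contains d 0 this]
          simp [this]
      simp only [step1]
      by_cases hlh : l ≠ h
      · simp only [if_pos hlh, List.foldl_cons, List.foldl_nil]
        by_cases hc : (d.insert h (d.getD h 0 + 1)).contains l = true
        · simp [hc, Ne.symm hlh]
        · have hcf : (d.insert h (d.getD h 0 + 1)).contains l = false := by simpa using hc
          rw [PySem.Dict.getD_of_not_contains _ 0 hcf]
          simp [hcf]
      · push Not at hlh
        subst hlh
        have hc : (d.insert l (d.getD l 0 + 1)).contains l = true :=
          PySem.Dict.contains_insert_self d l _
        simp [hc]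

-- A's whole loop is the counting fold over the flat endpoint list
lemma cruzA_fold (ruas : List (List String)) (d : PySem.Dict String Int) :
    ruas.foldl cruzAStep d
      = (ruas.flatMap cruzEnds).foldl (fun d x => d.insert x (d.getD x 0 + 1)) d := by
  induction ruas generalizing d with
  | nil => rfl
  | cons r rs ih =>
    rw [List.foldl_cons, ih, cruzA_step, List.flatMap_cons, List.foldl_append]

-- PySem.Set.ofList is a sublist (hence its order inherits any Pairwise relation)
lemma ofList_sublist (xs : List String) : (PySem.Set.ofList xs).Sublist xs := by
  induction xs with
  | nil => simp [PySem.Set.ofList_nil]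
  | cons x t ih =>
    rw [PySem.Set.ofList_cons]
    exact List.Sublist.cons₂ x ((List.filter_sublist).trans ih)

-- one step of B's grouping loop on a sorted prefix
lemma cruzB_group_step (pre : List String) (p : String)
    (hs : pre.Pairwise (· ≤ ·)) (hle : ∀ x ∈ pre, x ≤ p) :
    cruzBGroup (cruzGm pre) p = cruzGm (pre ++ [p]) := by
  unfold cruzGm
  rw [PySem.Set.ofList_append_singleton]
  have hnodup : (PySem.Set.ofList pre).Nodup := PySem.Set.nodup_ofList pre
  by_cases hp : p ∈ pre
  · -- p already seen: ofList unchanged; p is the LAST distinct name of the sorted prefix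
    rw [PySem.Set.add_of_mem ((PySem.Set.mem_ofList pre p).mpr hp)]
    have hsorted : (PySem.Set.ofList pre).Pairwise (· ≤ ·) := hs.sublist (ofList_sublist pre)
    have hne : PySem.Set.ofList pre ≠ [] := by
      intro h0
      have hmem : p ∈ PySem.Set.ofList pre := (PySem.Set.mem_ofList pre p).mpr hp
      rw [h0] at hmem; simp at hmem
    set m := (PySem.Set.ofList pre).getLast hne with hm
    have hL : PySem.Set.ofList pre = (PySem.Set.ofList pre).dropLast ++ [m] :=
      (List.dropLast_append_getLast hne).symm
    have hmp : m = p := by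
      have hm_mem : m ∈ PySem.Set.ofList pre := List.getLast_mem hne
      have hm_le : m ≤ p := hle m ((PySem.Set.mem_ofList pre m).mp hm_mem)
      have hp_le : p ≤ m := by
        have hpL : p ∈ (PySem.Set.ofList pre).dropLast ++ [m] := by
          rw [← hL]; exact (PySem.Set.mem_ofList pre p).mpr hp
        rcases List.mem_append.mp hpL with hmem | hmem
        · have hpw := List.pairwise_append.mp (hL ▸ hsorted)
          exact hpw.2.2 p hmem m (by simp)
        · simp at hmem; exact le_of_eq hmem
      exact le_antisymm hm_le hp_le
    set L0 := (PySem.Set.ofList pre).dropLast with hL0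
    have hL' : PySem.Set.ofList pre = L0 ++ [p] := by rw [← hmp]; exact hL
    have hpnot : p ∉ L0 := by
      have := hL' ▸ hnodup
      exact fun hmem => (List.disjoint_of_nodup_append this) hmem (by simp)
    rw [hL']
    have hcnt' : ∀ k ∈ L0, (((pre ++ [p]).count k : Int)) = ((pre.count k : Int)) := by
      intro k hk
      have hkp : k ≠ p := fun h => hpnot (h ▸ hk)
      have : (pre ++ [p]).count k = pre.count k := by
        rw [List.count_append]
        simp [List.count_cons, Ne.symm hkp]
      rw [this]
    have hfp : ((pre ++ [p]).count p : Int) = (pre.count p : Int) + 1 := by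
      rw [List.count_append]
      push_cast
      simp [List.count_cons]
    rw [List.map_append, List.map_append]
    simp only [List.map_cons, List.map_nil]
    rw [show cruzBGroup (List.map (fun k => (k, (pre.count k : Int))) L0 ++ [(p, (pre.count p : Int))]) p
        = List.map (fun k => (k, (pre.count k : Int))) L0 ++ [(p, (pre.count p : Int) + 1)] by
      unfold cruzBGroup
      rw [List.getLast?_concat]
      simp [List.dropLast_concat]]
    rw [hfp]
    congr 1
    exact (List.map_congr_left (fun k hk => by rw [hcnt' k hk])).symm
  · -- p is a new name: it is appended with count 1
    have hp' : p ∉ PySem.Set.ofList pre := fun h => hp ((PySem.Set.mem_ofList pre p).mp h)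
    rw [PySem.Set.add_of_not_mem hp']
    have hcnt' : ∀ k ∈ PySem.Set.ofList pre, (((pre ++ [p]).count k : Int)) = ((pre.count k : Int)) := by
      intro k hk
      have hkp : k ≠ p := fun h => hp' (h ▸ hk)
      have : (pre ++ [p]).count k = pre.count k := by
        rw [List.count_append]
        simp [List.count_cons, Ne.symm hkp]
      rw [this]
    have hfp : ((pre ++ [p]).count p : Int) = 1 := by
      rw [List.count_append]
      have : pre.count p = 0 := List.count_eq_zero.mpr hp
      simp [this, List.count_cons]
    have hlast : cruzBGroup (List.map (fun k => (k, (pre.count k : Int))) (PySem.Set.ofList pre)) p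
        = List.map (fun k => (k, (pre.count k : Int))) (PySem.Set.ofList pre) ++ [(p, 1)] := by
      cases hOL : PySem.Set.ofList pre with
      | nil => rfl
      | cons a t =>
        have hne : PySem.Set.ofList pre ≠ [] := by rw [hOL]; simp
        have hL : PySem.Set.ofList pre
            = (PySem.Set.ofList pre).dropLast ++ [(PySem.Set.ofList pre).getLast hne] :=
          (List.dropLast_append_getLast hne).symm
        have hmem : (PySem.Set.ofList pre).getLast hne ∈ PySem.Set.ofList pre :=
          List.getLast_mem hne
        have hmp : (PySem.Set.ofList pre).getLast hne ≠ p :=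
          fun h => hp' (h ▸ hmem)
        rw [← hOL]
        conv_lhs => rw [hL]
        rw [List.map_append]
        simp only [List.map_cons, List.map_nil]
        unfold cruzBGroup
        rw [List.getLast?_concat]
        simp only [if_neg hmp]
        conv_rhs => rw [hL]
        simp [List.map_append]
    rw [hlast, List.map_append]
    simp only [List.map_cons, List.map_nil, hfp]
    congr 1
    exact (List.map_congr_left (fun k hk => by rw [hcnt' k hk])).symm

-- B's grouping loop over a sorted list produces the dedup/count table
lemma cruzB_group (l : List String) (pre : List String)
    (hs : (pre ++ l).Pairwise (· ≤ ·)) :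
    l.foldl cruzBGroup (cruzGm pre) = cruzGm (pre ++ l) := by
  induction l generalizing pre with
  | nil => simp
  | cons p t ih =>
    have hs' : (pre ++ [p] ++ t).Pairwise (· ≤ ·) := by simpa using hs
    have hpre : pre.Pairwise (· ≤ ·) := (List.pairwise_append.mp hs).1
    have hle : ∀ x ∈ pre, x ≤ p := by
      intro x hx
      exact (List.pairwise_append.mp hs).2.2 x hx p (by simp)
    rw [List.foldl_cons, cruzB_group_step pre p hpre hle, ih (pre ++ [p]) hs']
    simp

-- Python's tuple-key sort (count, name) is the sort by the lexicographic key
lemma sorted2_eq_sorted_lex (xs : List (String × Int)) :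
    PySem.List.sorted2 xs (fun x => x.2) (fun x => x.1)
      = PySem.List.sorted xs (fun x => toLex (x.2, x.1)) := by
  rw [PySem.List.sorted_eq_foldl_insertBy]
  unfold PySem.List.sorted2
  have h : (fun (a b : String × Int) =>
        (decide (a.2 < b.2) || (!decide (b.2 < a.2) && decide (a.1 < b.1))))
      = fun (a b : String × Int) => decide (toLex (a.2, a.1) < toLex (b.2, b.1)) := by
    funext a b
    simp only [Prod.Lex.lt_iff, ofLex_toLex]
    rcases lt_trichotomy a.2 b.2 with h1 | h1 | h1
    · simp [h1, not_lt.mpr (le_of_lt h1)]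
    · simp [h1]
    · simp [not_lt.mpr (le_of_lt h1), h1, (ne_of_gt h1)]
  simp only [Bool.false_eq_true, if_false, h]

-- ===== VERDICT (by name: the statement is the Claim_ definition above) =====
theorem cruzamentos_spec : Claim_equal_cruzamentos := by
  intro ruas _ hpre
  unfold Spec_cruzamentos cruzamentos cruzamentos_alt
  rw [sorted2_eq_sorted_lex, sorted2_eq_sorted_lex]
  set E := ruas.flatMap cruzEnds with hE
  -- A's items list
  rw [cruzA_fold, PySem.Dict.foldl_insert_getD_add_one_eq_counter, PySem.Dict.items_counter]
  -- B's pares list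
  rw [cruzB_points]
  simp only [List.nil_append]
  have hsp : (PySem.List.sorted E (fun x => x)).Pairwise (· ≤ ·) := by
    simpa using PySem.List.sorted_pairwise E (fun x => x)
  have hB : (PySem.List.sorted E (fun x => x)).foldl cruzBGroup []
      = cruzGm (PySem.List.sorted E (fun x => x)) := by
    have := cruzB_group (PySem.List.sorted E (fun x => x)) [] (by simpa using hsp)
    simpa [cruzGm] using this
  rw [hB]
  -- both are sorts (by an injective key) of permuted lists
  apply PySem.List.sorted_eq_sorted_of_perm
  · intro a b hab
    have h1 := congrArg (fun p => (ofLex p).1) hab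
    have h2 := congrArg (fun p => (ofLex p).2) hab
    simp at h1 h2
    exact Prod.ext h2 h1
  · -- Perm between A's table and B's table
    have hperm : E.Perm (PySem.List.sorted E (fun x => x)) :=
      (PySem.List.sorted_perm E (fun x => x) false).symm
    have hset : (PySem.Set.ofList E).Perm (PySem.Set.ofList (PySem.List.sorted E (fun x => x))) := by
      rw [List.perm_ext_iff_of_nodup (PySem.Set.nodup_ofList E) (PySem.Set.nodup_ofList _)]
      intro a
      simp only [PySem.Set.mem_ofList]
      exact hperm.mem_iff
    unfold cruzGm
    have hcnt : ∀ k, ((PySem.List.sorted E (fun x => x)).count k : Int) = (E.count k : Int) := by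
      intro k; exact congrArg (fun n : Nat => (n : Int)) (hperm.count_eq k).symm
    have h2 : (PySem.Set.ofList (PySem.List.sorted E (fun x => x))).map
          (fun k => (k, (E.count k : Int)))
        = (PySem.Set.ofList (PySem.List.sorted E (fun x => x))).map
          (fun k => (k, ((PySem.List.sorted E (fun x => x)).count k : Int))) :=
      List.map_congr_left (fun k _ => by rw [hcnt k])
    exact h2 ▸ hset.map (fun k => (k, (E.count k : Int)))
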